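-- pv_equiv track=rewrite | github.com/ryandavis3/leetcode | frequency_most_frequent_element2.py | get_max_frequency
-- ===== SOURCE A (Python) =====
-- from typing import List
--
-- def get_max_frequency(nums: List[int], k: int) -> int:
--     nums = sorted(nums)
--     L = len(nums)
--     left = 0
--     curr_sum = nums[left]
--     max_freq = 1
--     for right in range(1, L):
--         curr_sum += nums[right]
--         window_size = (right - left + 1)
--         target_sum = window_size * nums[right]
--         while target_sum - curr_sum > k:
--             curr_sum -= nums[left]
--             target_sum -= nums[right]
--             left += 1
--             window_size = (right - left + 1)
--         if window_size > max_freq: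
--             max_freq = window_size
--     return max_freq
-- ===== SOURCE B (Python) =====
-- from typing import List
--
-- def get_max_frequency(nums: List[int], k: int) -> int:
--     a = sorted(nums)
--     L = len(a)
--     prefix = [0]
--     s = 0
--     for x in a:
--         s += x
--         prefix.append(s)
--     max_freq = 0
--     for right in range(L):
--         lo, hi = 0, right
--         while lo < hi:
--             mid = (lo + hi) // 2
--             if (right - mid + 1) * a[right] - (prefix[right + 1] - prefix[mid]) > k:
--                 lo = mid + 1
--             else:
--                 hi = mid
--         if right - lo + 1 > max_freq:
--             max_freq = right - lo + 1
--     return max_freq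
-- ===== Notes on version B (the rewrite author's own statement) =====
-- stated objective: alternative
-- what changed: Replaces A's single-pass sliding window (moving left pointer with a running window sum) by a prefix-sum array plus, for each right index, a binary search for the smallest valid window start.
import Mathlib
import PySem

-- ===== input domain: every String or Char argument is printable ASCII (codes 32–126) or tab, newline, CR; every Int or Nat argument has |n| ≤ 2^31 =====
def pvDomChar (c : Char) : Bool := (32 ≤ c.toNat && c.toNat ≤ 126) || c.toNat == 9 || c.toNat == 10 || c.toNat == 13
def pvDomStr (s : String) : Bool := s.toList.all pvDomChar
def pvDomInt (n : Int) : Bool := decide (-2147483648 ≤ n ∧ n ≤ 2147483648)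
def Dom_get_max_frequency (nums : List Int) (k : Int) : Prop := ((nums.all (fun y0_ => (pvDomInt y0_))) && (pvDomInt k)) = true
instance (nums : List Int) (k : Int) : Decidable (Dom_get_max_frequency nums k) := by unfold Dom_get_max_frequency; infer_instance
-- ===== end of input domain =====

-- B replaces A's moving-left sliding window by a prefix-sum array and a per-right binary
-- search for the smallest valid window start (objective: alternative decomposition, same cost).

-- ===== PORT A =====
-- the 'while target_sum - curr_sum > k' loop; fuel only makes it total (inside Pre_ it exits before fuel runs out)
def pvA_while (a : List Int) (k : Int) (right : Int) : Int → Int → Int → Nat → Int × Int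
  | left, curr_sum, _target_sum, 0 => (left, curr_sum)
  | left, curr_sum, target_sum, fuel+1 =>
    if target_sum - curr_sum > k then
      pvA_while a k right (left + 1) (curr_sum - PySem.List.pyGetD a left 0)
        (target_sum - PySem.List.pyGetD a right 0) fuel
    else (left, curr_sum)

-- one iteration of A's 'for right in range(1, L)' body; state = (left, curr_sum, max_freq)
def pvA_step (a : List Int) (k : Int) (st : Int × Int × Int) (right : Int) : Int × Int × Int :=
  let curr_sum := st.2.1 + PySem.List.pyGetD a right 0
  let target_sum := (right - st.1 + 1) * PySem.List.pyGetD a right 0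
  let r := pvA_while a k right st.1 curr_sum target_sum (a.length + 1)
  let window := right - r.1 + 1
  (r.1, r.2, if window > st.2.2 then window else st.2.2)

def pvA_main (a : List Int) (k : Int) : Int :=
  ((PySem.List.pyRange 1 (a.length) 1).foldl (pvA_step a k)
    (0, PySem.List.pyGetD a 0 0, 1)).2.2

def get_max_frequency (nums : List Int) (k : Int) : Int :=
  pvA_main (PySem.List.sorted nums (fun x => x) false) k

-- ===== PORT B =====
-- Source B's prefix list: prefix = [0]; s = 0; for x in a: s += x; prefix.append(s)
def pvB_prefix (a : List Int) : List Int :=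
  (a.foldl (fun (p : List Int × Int) x => (p.1 ++ [p.2 + x], p.2 + x)) ([0], 0)).1

-- Source B's hand-written lower-bound binary search over window starts (fuel only makes it total)
def pvB_bisect (a pre : List Int) (k : Int) (right : Int) : Int → Int → Nat → Int
  | lo, _hi, 0 => lo
  | lo, hi, fuel+1 =>
    if lo < hi then
      let mid := PySem.Int.floordiv (lo + hi) 2
      if (right - mid + 1) * PySem.List.pyGetD a right 0 -
          (PySem.List.pyGetD pre (right + 1) 0 - PySem.List.pyGetD pre mid 0) > k then
        pvB_bisect a pre k right (mid + 1) hi fuel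
      else
        pvB_bisect a pre k right lo mid fuel
    else lo

def pvB_main (a : List Int) (k : Int) : Int :=
  let pre := pvB_prefix a
  (PySem.List.pyRange 0 (a.length) 1).foldl (fun max_freq right =>
    let lo := pvB_bisect a pre k right 0 right (a.length + 1)
    if right - lo + 1 > max_freq then right - lo + 1 else max_freq) 0

def get_max_frequency_alt (nums : List Int) (k : Int) : Int :=
  pvB_main (PySem.List.sorted nums (fun x => x) false) k

-- ===== PRECONDITION & SPEC =====
-- Pre_ excludes exactly the inputs on which A raises IndexError: the empty list (nums[0]),
-- and a negative budget k with at least two elements (the shrink loop then runs off the end).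
def Pre_get_max_frequency (nums : List Int) (k : Int) : Prop :=
  nums ≠ [] ∧ (0 ≤ k ∨ nums.length = 1)
instance (nums : List Int) (k : Int) : Decidable (Pre_get_max_frequency nums k) := by
  unfold Pre_get_max_frequency; infer_instance

def pvWitness_get_max_frequency : List Int × Int := ([1, 2, 2], 1)

def Spec_get_max_frequency (nums : List Int) (k : Int) (out : Int) : Prop :=
  out = get_max_frequency_alt nums k
instance (nums : List Int) (k : Int) (out : Int) : Decidable (Spec_get_max_frequency nums k out) := by
  unfold Spec_get_max_frequency; infer_instance

-- ===== CLAIM (what is proved, stated in full; the proofs are below) =====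
def Claim_equal_get_max_frequency : Prop := ∀ (nums : List Int) (k : Int),
  Dom_get_max_frequency nums k → Pre_get_max_frequency nums k →
  Spec_get_max_frequency nums k (get_max_frequency nums k)

-- ===== LEMMAS AND PROOFS =====

-- sum of the first i elements
def pvS (a : List Int) (i : Nat) : Int := (a.take i).sum

-- cost of making a[l..r] all equal to a[r]
def pvCost (a : List Int) (r l : Nat) : Int :=
  ((r : Int) - l + 1) * a.getD r 0 - (pvS a (r + 1) - pvS a l)

-- the least l with pvCost a r l ≤ k (the '∨ r ≤ l' escape guarantees existence)
def pvMin (a : List Int) (k : Int) (r : Nat) : Nat :=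
  Nat.find (p := fun l => pvCost a r l ≤ k ∨ r ≤ l) ⟨r, Or.inr le_rfl⟩

-- the running maximum of window widths r' - pvMin r' + 1 over r' ≤ r
def pvM (a : List Int) (k : Int) : Nat → Int
  | 0 => 1
  | r+1 =>
    let w : Int := ((r : Int) + 1) - pvMin a k (r + 1) + 1
    if w > pvM a k r then w else pvM a k r

theorem pvS_succ (a : List Int) (i : Nat) (h : i < a.length) :
    pvS a (i + 1) = pvS a i + a.getD i 0 := by
  simp [pvS, List.sum_take_succ a i h, List.getD, List.getElem?_eq_getElem h]

theorem pv_getD_mono (a : List Int) (hs : a.Pairwise (· ≤ ·)) {i j : Nat}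
    (hij : i ≤ j) (hj : j < a.length) : a.getD i 0 ≤ a.getD j 0 := by
  rcases Nat.lt_or_ge i j with h | h
  · rw [List.getD_eq_getElem a 0 (lt_of_le_of_lt hij hj), List.getD_eq_getElem a 0 hj]
    exact List.pairwise_iff_getElem.mp hs i j _ hj h
  · have : i = j := le_antisymm hij h
    subst this; rfl

theorem pvCost_rr (a : List Int) (r : Nat) (hr : r < a.length) : pvCost a r r = 0 := by
  simp [pvCost, pvS_succ a r hr]

theorem pvCost_step (a : List Int) (r l : Nat) (hl : l < r) (hr : r < a.length) :
    pvCost a r l = pvCost a r (l + 1) + (a.getD r 0 - a.getD l 0) := by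
  have h1 := pvS_succ a l (lt_trans hl hr)
  unfold pvCost
  rw [h1]
  push_cast
  ring

theorem pvCost_antitone (a : List Int) (hs : a.Pairwise (· ≤ ·)) {j l r : Nat}
    (hjl : j ≤ l) (hlr : l ≤ r) (hr : r < a.length) : pvCost a r l ≤ pvCost a r j := by
  induction l with
  | zero => simp_all
  | succ n ih =>
    rcases Nat.lt_or_ge j (n+1) with h | h
    · have h1 : pvCost a r n = pvCost a r (n+1) + (a.getD r 0 - a.getD n 0) :=
        pvCost_step a r n (by omega) hr
      have h2 : a.getD n 0 ≤ a.getD r 0 := pv_getD_mono a hs (by omega) hr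
      have h3 := ih (by omega) (by omega)
      omega
    · have : j = n + 1 := by omega
      subst this; rfl

theorem pvCost_mono_r (a : List Int) (hs : a.Pairwise (· ≤ ·)) {l r : Nat}
    (hlr : l ≤ r) (hr : r + 1 < a.length) : pvCost a r l ≤ pvCost a (r + 1) l := by
  have h1 : pvS a (r + 2) = pvS a (r + 1) + a.getD (r+1) 0 := pvS_succ a (r+1) hr
  have h2 : a.getD r 0 ≤ a.getD (r+1) 0 := pv_getD_mono a hs (by omega) hr
  have h3 : pvCost a (r+1) l - pvCost a r l
      = ((r : Int) - l + 1) * (a.getD (r+1) 0 - a.getD r 0) := by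
    simp only [pvCost, h1]; push_cast; ring
  nlinarith [h3]

theorem pvMin_le (a : List Int) (k : Int) (r : Nat) : pvMin a k r ≤ r :=
  Nat.find_le (Or.inr le_rfl)

theorem pvMin_valid (a : List Int) (k : Int) (r : Nat) (hk : 0 ≤ k) (hr : r < a.length) :
    pvCost a r (pvMin a k r) ≤ k := by
  rcases Nat.find_spec (p := fun l => pvCost a r l ≤ k ∨ r ≤ l) ⟨r, Or.inr le_rfl⟩ with h | h
  · exact h
  · have : pvMin a k r = r := le_antisymm (pvMin_le a k r) h
    rw [show pvMin a k r = r from this, pvCost_rr a r hr]; exact hk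

theorem pvMin_not_valid (a : List Int) (k : Int) {r j : Nat} (hj : j < pvMin a k r) :
    ¬ pvCost a r j ≤ k := by
  have h := Nat.find_min (p := fun l => pvCost a r l ≤ k ∨ r ≤ l) ⟨r, Or.inr le_rfl⟩ hj
  intro hc; exact h (Or.inl hc)

theorem pvMin_le_of_valid (a : List Int) (k : Int) {r l : Nat} (h : pvCost a r l ≤ k) :
    pvMin a k r ≤ l := Nat.find_le (Or.inl h)

theorem pvMin_mono (a : List Int) (k : Int) (hs : a.Pairwise (· ≤ ·)) {r : Nat}
    (hk : 0 ≤ k) (hr : r + 1 < a.length) : pvMin a k r ≤ pvMin a k (r + 1) := by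
  rcases Nat.lt_or_ge (pvMin a k (r + 1)) (pvMin a k r) with hlt | hge
  · exfalso
    have h1 : pvCost a (r+1) (pvMin a k (r+1)) ≤ k := pvMin_valid a k (r+1) hk hr
    have h2 : pvMin a k (r+1) ≤ r := by have := pvMin_le a k r; omega
    have h3 : pvCost a r (pvMin a k (r+1)) ≤ pvCost a (r+1) (pvMin a k (r+1)) :=
      pvCost_mono_r a hs h2 hr
    exact pvMin_not_valid a k hlt (le_trans h3 h1)
  · exact hge

-- ===== A-side loop lemmas =====

theorem pvA_while_spec (a : List Int) (k : Int) (hk : 0 ≤ k)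
    (r : Nat) (hr : r < a.length) :
    ∀ (fuel l0 : Nat), l0 ≤ pvMin a k r → pvMin a k r - l0 < fuel →
    pvA_while a k (r : Int) (l0 : Int) (pvS a (r+1) - pvS a l0)
        (((r : Int) - l0 + 1) * a.getD r 0) fuel
      = ((pvMin a k r : Int), pvS a (r+1) - pvS a (pvMin a k r)) := by
  intro fuel
  induction fuel with
  | zero => intro l0 h1 h2; omega
  | succ n ih =>
    intro l0 h1 h2
    have hcost : ((r : Int) - l0 + 1) * a.getD r 0 - (pvS a (r+1) - pvS a l0) = pvCost a r l0 := rfl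
    by_cases hc : pvCost a r l0 ≤ k
    · have : l0 = pvMin a k r := le_antisymm h1 (pvMin_le_of_valid a k hc)
      subst this
      rw [pvA_while]
      simp only [hcost]
      rw [if_neg (by omega)]
    · have hlt : l0 < pvMin a k r := by
        rcases Nat.lt_or_ge l0 (pvMin a k r) with h | h
        · exact h
        · exact absurd (le_antisymm h1 h ▸ pvMin_valid a k r hk hr) hc
      have hl0r : l0 < r := lt_of_lt_of_le hlt (pvMin_le a k r)
      rw [pvA_while]
      simp only [hcost]
      rw [if_pos (by omega)]
      rw [PySem.List.pyGetD_natCast, PySem.List.pyGetD_natCast]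
      have e1 : (l0 : Int) + 1 = ((l0 + 1 : Nat) : Int) := by push_cast; ring
      have e2 : pvS a (r+1) - pvS a l0 - a.getD l0 0 = pvS a (r+1) - pvS a (l0+1) := by
        have := pvS_succ a l0 (by omega); omega
      have e3 : ((r : Int) - l0 + 1) * a.getD r 0 - a.getD r 0
          = ((r : Int) - (l0+1:Nat) + 1) * a.getD r 0 := by push_cast; ring
      rw [e1, e2, e3]
      exact ih (l0+1) (by omega) (by omega)

theorem pvA_fold_spec (a : List Int) (k : Int) (hs : a.Pairwise (· ≤ ·)) (hk : 0 ≤ k) :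
    ∀ (r : Nat), r < a.length →
    (PySem.List.pyRange 1 ((r : Int) + 1) 1).foldl (pvA_step a k)
        (0, PySem.List.pyGetD a 0 0, 1)
      = ((pvMin a k r : Int), pvS a (r+1) - pvS a (pvMin a k r), pvM a k r) := by
  intro r
  induction r with
  | zero =>
    intro hr
    rw [show ((0:Nat):Int) + 1 = 1 by norm_num,
      show PySem.List.pyRange 1 1 1 = [] from by decide]
    have hmin : pvMin a k 0 = 0 := Nat.le_zero.mp (pvMin_le a k 0)
    have hget : PySem.List.pyGetD a 0 0 = pvS a 1 - pvS a 0 := by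
      have h0 : pvS a 1 = pvS a 0 + a.getD 0 0 := pvS_succ a 0 hr
      rw [PySem.List.pyGetD_zero]
      omega
    simp [hmin, pvM, hget]
  | succ n ih =>
    intro hr
    have hn : n < a.length := by omega
    have hsplit : PySem.List.pyRange 1 ((n:Int) + 1 + 1) 1
        = PySem.List.pyRange 1 ((n:Int) + 1) 1 ++ [(n:Int) + 1] :=
      PySem.List.pyRange_one_succ_right (a := 1) (b := (n:Int)+1) (by omega)
    rw [show (((n+1:Nat)):Int) + 1 = (n:Int) + 1 + 1 by push_cast; ring, hsplit,
      List.foldl_append, ih hn]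
    simp only [List.foldl_cons, List.foldl_nil, pvA_step]
    have ecast : (n : Int) + 1 = ((n+1 : Nat) : Int) := by push_cast; ring
    rw [ecast, PySem.List.pyGetD_natCast]
    have e2 : pvS a (n+1) - pvS a (pvMin a k n) + a.getD (n+1) 0
        = pvS a ((n+1)+1) - pvS a (pvMin a k n) := by
      have := pvS_succ a (n+1) hr; omega
    have hmono : pvMin a k n ≤ pvMin a k (n+1) := pvMin_mono a k hs hk hr
    have hW := pvA_while_spec a k hk (n+1) hr (a.length + 1) (pvMin a k n)
      hmono (by have := pvMin_le a k (n+1); omega)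
    simp only [e2]
    rw [show ((pvMin a k n : Nat) : Int) = ((pvMin a k n : Nat) : Int) from rfl]
    rw [hW]
    simp only [pvM]
    push_cast
    rfl

-- ===== B-side lemmas =====

theorem pvB_prefix_eq (a : List Int) :
    pvB_prefix a = (List.range (a.length + 1)).map (pvS a) := by
  suffices h : ∀ (l : List Int),
      (l.foldl (fun (p : List Int × Int) x => (p.1 ++ [p.2 + x], p.2 + x)) ([0], 0))
        = ((List.range (l.length + 1)).map (pvS l), pvS l l.length) by
    simpa [pvB_prefix] using congrArg Prod.fst (h a)
  intro l
  induction l using List.reverseRecOn with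
  | nil => simp [pvS]
  | append_singleton t x ih =>
    rw [List.foldl_append, ih]
    have hkeep : ∀ i, i ≤ t.length → pvS (t ++ [x]) i = pvS t i := by
      intro i hi
      simp [pvS, List.take_append_of_le_length hi]
    have hlast : pvS (t ++ [x]) (t.length + 1) = pvS t t.length + x := by
      simp [pvS]
    simp only [List.foldl_cons, List.foldl_nil, List.length_append, List.length_singleton,
      Prod.mk.injEq]
    refine ⟨?_, ?_⟩
    · rw [List.range_succ (n := t.length + 1), List.map_append]
      congr 1
      · apply List.map_congr_left
        intro i hi
        rw [List.mem_range] at hi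
        exact (hkeep i (by omega)).symm
      · simp [hlast]
    · rw [hlast]

theorem pvB_prefix_getD (a : List Int) (i : Nat) (hi : i ≤ a.length) :
    PySem.List.pyGetD (pvB_prefix a) (i : Int) 0 = pvS a i := by
  rw [pvB_prefix_eq, PySem.List.pyGetD_natCast]
  rw [List.getD_eq_getElem _ 0 (by simpa using by omega)]
  simp

theorem pvB_bisect_spec (a : List Int) (k : Int) (hs : a.Pairwise (· ≤ ·)) (hk : 0 ≤ k)
    (r : Nat) (hr : r < a.length) :
    ∀ (fuel lo hi : Nat), lo ≤ pvMin a k r → pvMin a k r ≤ hi → hi ≤ r →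
      hi - lo < fuel →
    pvB_bisect a (pvB_prefix a) k (r : Int) (lo : Int) (hi : Int) fuel = ((pvMin a k r : Nat) : Int) := by
  intro fuel
  induction fuel with
  | zero => intro lo hi h1 h2 h3 h4; omega
  | succ n ih =>
    intro lo hi h1 h2 h3 h4
    rw [pvB_bisect]
    by_cases hlh : lo < hi
    · rw [if_pos (by exact_mod_cast hlh)]
      have hmid : PySem.Int.floordiv ((lo : Int) + hi) 2 = (((lo + hi) / 2 : Nat) : Int) := by
        rw [show ((lo : Int) + hi) = (((lo + hi : Nat)) : Int) by push_cast; ring]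
        exact_mod_cast PySem.Int.floordiv_natCast (lo + hi) 2
      set m : Nat := (lo + hi) / 2 with hm
      have hlom : lo ≤ m := by omega
      have hmhi : m < hi := by omega
      have hr1 : ((r : Int) + 1) = (((r+1 : Nat)) : Int) := by push_cast; ring
      have hm1 : ((m : Int) + 1) = (((m+1 : Nat)) : Int) := by push_cast; ring
      have hcost : ((r : Int) - (m:Int) + 1) * a.getD r 0 - (pvS a (r+1) - pvS a m)
          = pvCost a r m := rfl
      simp only [hmid, PySem.List.pyGetD_natCast, hr1,
        pvB_prefix_getD a (r+1) (by omega), pvB_prefix_getD a m (by omega), hcost]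
      by_cases hc : pvCost a r m ≤ k
      · rw [if_neg (by omega)]
        exact ih lo m h1 (pvMin_le_of_valid a k hc) (by omega) (by omega)
      · rw [if_pos (by omega)]
        have hmlt : m < pvMin a k r := by
          rcases Nat.lt_or_ge m (pvMin a k r) with hlt2 | hge
          · exact hlt2
          exfalso
          have hc2 := pvCost_antitone a hs hge (by omega) hr
          have hc3 := pvMin_valid a k r hk hr
          omega
        rw [hm1]
        exact ih (m+1) hi (by omega) h2 h3 (by omega)
    · rw [if_neg (by exact_mod_cast hlh)]
      congr 1
      omega

theorem pvB_fold_spec (a : List Int) (k : Int) (hs : a.Pairwise (· ≤ ·)) (hk : 0 ≤ k) :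
    ∀ (r : Nat), r < a.length →
    (PySem.List.pyRange 0 ((r : Int) + 1) 1).foldl (fun max_freq right =>
        let lo := pvB_bisect a (pvB_prefix a) k right 0 right (a.length + 1)
        if right - lo + 1 > max_freq then right - lo + 1 else max_freq) 0
      = pvM a k r := by
  intro r
  induction r with
  | zero =>
    intro hr
    rw [show ((0:Nat):Int) + 1 = 1 by norm_num,
      show PySem.List.pyRange 0 1 1 = [0] from by decide]
    have hmin : pvMin a k 0 = 0 := Nat.le_zero.mp (pvMin_le a k 0)
    have hb := pvB_bisect_spec a k hs hk 0 hr (a.length + 1) 0 0 (by omega) (by omega)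
      (by omega) (by omega)
    rw [show ((0:Nat):Int) = (0:Int) from rfl] at hb
    simp only [List.foldl_cons, List.foldl_nil, hb, hmin]
    norm_num [pvM]
  | succ n ih =>
    intro hr
    have hsplit : PySem.List.pyRange 0 ((n:Int) + 1 + 1) 1
        = PySem.List.pyRange 0 ((n:Int) + 1) 1 ++ [(n:Int) + 1] :=
      PySem.List.pyRange_one_succ_right (a := 0) (b := (n:Int)+1) (by omega)
    rw [show (((n+1:Nat)):Int) + 1 = (n:Int) + 1 + 1 by push_cast; ring, hsplit,
      List.foldl_append, ih (by omega)]
    have ecast : (n : Int) + 1 = ((n+1 : Nat) : Int) := by push_cast; ring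
    have hb := pvB_bisect_spec a k hs hk (n+1) hr (a.length + 1) 0 (n+1) (by omega)
      (pvMin_le a k (n+1)) (by omega) (by omega)
    rw [show ((0:Nat):Int) = (0:Int) from rfl] at hb
    simp only [List.foldl_cons, List.foldl_nil, ecast, hb]
    simp only [pvM]
    push_cast
    rfl

-- A = B over any sorted list with 0 ≤ k
theorem pv_main_eq (a : List Int) (k : Int) (hs : a.Pairwise (· ≤ ·)) (hk : 0 ≤ k)
    (hne : a ≠ []) : pvA_main a k = pvB_main a k := by
  obtain ⟨r, hr⟩ : ∃ r, a.length = r + 1 := by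
    cases a with
    | nil => exact absurd rfl hne
    | cons x t => exact ⟨t.length, rfl⟩
  have hrlt : r < a.length := by omega
  have hA := pvA_fold_spec a k hs hk r hrlt
  have hB := pvB_fold_spec a k hs hk r hrlt
  have hcast : ((a.length : Nat) : Int) = (r : Int) + 1 := by rw [hr]; push_cast; ring
  unfold pvA_main pvB_main
  simp only [hcast, hA, hB]

-- the singleton case: A's for-loop body never runs, B's binary search is trivial; both return 1
theorem pv_main_eq_singleton (x k : Int) : pvA_main [x] k = pvB_main [x] k := by
  unfold pvA_main pvB_main
  rw [show (([x] : List Int).length) = 1 from rfl,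
    show PySem.List.pyRange 1 ((1:Nat):Int) 1 = [] from by decide,
    show PySem.List.pyRange 0 ((1:Nat):Int) 1 = [0] from by decide]
  simp only [List.foldl_cons, List.foldl_nil]
  norm_num [pvB_bisect]

-- ===== VERDICT (by name: the statement is the Claim_ definition above) =====
theorem get_max_frequency_spec : Claim_equal_get_max_frequency := by
  intro nums k _ hpre
  obtain ⟨hne, hk⟩ := hpre
  unfold Spec_get_max_frequency get_max_frequency get_max_frequency_alt
  set a := PySem.List.sorted nums (fun x => x) false with ha
  have hs : a.Pairwise (· ≤ ·) := PySem.List.sorted_pairwise nums (fun x => x)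
  have hane : a ≠ [] := by
    rw [ha]
    intro h
    exact hne ((PySem.List.sorted_eq_nil_iff nums (fun x => x) false).mp h)
  rcases hk with hk | hone
  · exact pv_main_eq a k hs hk hane
  · have hlen : a.length = 1 := by rw [ha, PySem.List.length_sorted]; exact hone
    obtain ⟨x, hx⟩ : ∃ x, a = [x] := List.length_eq_one_iff.mp hlen
    rw [hx]
    exact pv_main_eq_singleton x k
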